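-- pv_equiv track=rewrite | github.com/Lyncs-API/lyncs.utils | lyncs_utils/class_utils.py | get_parameters_doc
-- ===== SOURCE A (Python) =====
-- def get_parameters_doc(doc):
--     """
--     Extracts the documentation of the parameters
--     """
--     if not doc:
--         return doc
--
--     found = False
--     parameters = []
--     for line in doc.split("\n"):
--         words = line.split()
--         if not found and len(words) == 1 and words[0].startswith("Parameter"):
--             found = True
--         elif found and words:
--             parameters.append(line)
--         elif found and not words:
--             break
--
--     if found and parameters:
--         return "\n".join(parameters[1:])
--     return doc
-- ===== SOURCE B (Python) =====
-- def get_parameters_doc(doc):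
--     """
--     Extracts the documentation of the parameters
--     """
--     if not doc:
--         return doc
--     lines = doc.split("\n")
--     i = next((k for k, line in enumerate(lines)
--               if len(line.split()) == 1 and line.split()[0].startswith("Parameter")),
--              None)
--     if i is None:
--         return doc
--     tail = lines[i + 1:]
--     blank = next((k for k, line in enumerate(tail) if not line.split()), len(tail))
--     if blank == 0:
--         return doc
--     return "\n".join(tail[1:blank])
-- ===== Notes on version B (the rewrite author's own statement) =====
-- stated objective: alternative
-- what changed: A's single stateful scan with a found-flag, an accumulator list and a break is replaced by two explicit index searches (first header line, then first blank line after it) followed by one slice-and-join of the original line list.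
import Mathlib
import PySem

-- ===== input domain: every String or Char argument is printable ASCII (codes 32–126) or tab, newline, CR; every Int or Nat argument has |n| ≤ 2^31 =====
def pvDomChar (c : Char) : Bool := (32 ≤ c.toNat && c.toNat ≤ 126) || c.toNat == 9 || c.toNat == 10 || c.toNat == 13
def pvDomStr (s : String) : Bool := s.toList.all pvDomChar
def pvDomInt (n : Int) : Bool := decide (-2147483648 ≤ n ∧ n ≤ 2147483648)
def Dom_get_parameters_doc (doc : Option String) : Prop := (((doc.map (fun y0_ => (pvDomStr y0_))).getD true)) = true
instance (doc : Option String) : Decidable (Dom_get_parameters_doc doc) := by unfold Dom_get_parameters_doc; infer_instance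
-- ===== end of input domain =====

-- B replaces A's single stateful flag-and-accumulator scan by two index searches
-- (header line, then first blank line) followed by one slice-and-join; same cost,
-- different decomposition (objective: alternative).

-- ===== PORT A =====
-- A's for-loop with `found` flag, `parameters` accumulator and `break`:
-- returns the final (found, parameters) pair.
def pvLoopA : List String → Bool → List String → Bool × List String
  | [], found, params => (found, params)
  | line :: rest, found, params =>
    let words := PySem.Str.split₀ line
    if !found && (words.length == 1 && PySem.Str.startswith (words.headD "") "Parameter") then
      pvLoopA rest true params
    else if found && !words.isEmpty then
      pvLoopA rest found (params ++ [line])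
    else if found && words.isEmpty then
      (found, params)          -- break
    else
      pvLoopA rest found params

def get_parameters_doc (doc : Option String) : Option String :=
  match doc with
  | none => none
  | some s =>
    if s = "" then some s
    else
      let res := pvLoopA ((PySem.Str.split? s "\n").getD []) false []
      if res.1 && !res.2.isEmpty then
        some (PySem.Str.join "\n" (PySem.List.slice res.2 (some 1) none))
      else some s

-- ===== PORT B =====
-- index of the first line whose split() is a single word starting with "Parameter"
def pvHdrIdx : List String → Option Nat
  | [] => none
  | line :: rest =>
    let ws := PySem.Str.split₀ line
    if ws.length == 1 && PySem.Str.startswith (ws.headD "") "Parameter" then some 0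
    else (pvHdrIdx rest).map (· + 1)

-- index of the first blank line (default: length of the list)
def pvBlankIdx : List String → Nat
  | [] => 0
  | line :: rest =>
    if (PySem.Str.split₀ line).isEmpty then 0 else pvBlankIdx rest + 1

def get_parameters_doc_alt (doc : Option String) : Option String :=
  match doc with
  | none => none
  | some s =>
    if s = "" then some s
    else
      let lines := (PySem.Str.split? s "\n").getD []
      match pvHdrIdx lines with
      | none => some s
      | some i =>
        let tail := PySem.List.slice lines (some ((i : Int) + 1)) none
        let blank := pvBlankIdx tail
        if blank = 0 then some s
        else some (PySem.Str.join "\n" (PySem.List.slice tail (some 1) (some (blank : Int))))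

-- ===== PRECONDITION & SPEC =====
def Spec_get_parameters_doc (doc : Option String) (out : Option String) : Prop := out = get_parameters_doc_alt doc
instance (doc : Option String) (out : Option String) : Decidable (Spec_get_parameters_doc doc out) := by unfold Spec_get_parameters_doc; infer_instance

-- ===== CLAIM (what is proved, stated in full; the proofs are below) =====
def Claim_equal_get_parameters_doc : Prop := ∀ (doc : Option String), Dom_get_parameters_doc doc → Spec_get_parameters_doc doc (get_parameters_doc doc)

-- ===== LEMMAS AND PROOFS =====

-- once found, A collects exactly the lines before the first blank one
theorem pvLoopA_found (tail : List String) : ∀ acc,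
    pvLoopA tail true acc = (true, acc ++ tail.take (pvBlankIdx tail)) := by
  induction tail with
  | nil => intro acc; simp [pvLoopA, pvBlankIdx]
  | cons line rest ih =>
    intro acc
    by_cases hb : (PySem.Str.split₀ line).isEmpty
    · simp [pvLoopA, pvBlankIdx, hb]
    · simp [pvLoopA, pvBlankIdx, hb, ih]

-- before the header is found, A just scans; the result is determined by pvHdrIdx
theorem pvLoopA_search (lines : List String) :
    pvLoopA lines false [] =
      match pvHdrIdx lines with
      | none => (false, [])
      | some i => (true, (lines.drop (i + 1)).take (pvBlankIdx (lines.drop (i + 1)))) := by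
  induction lines with
  | nil => simp [pvLoopA, pvHdrIdx]
  | cons line rest ih =>
    simp only [pvLoopA, pvHdrIdx, Bool.not_false, Bool.true_and, Bool.false_and]
    by_cases hh : ((PySem.Str.split₀ line).length == 1
        && PySem.Str.startswith ((PySem.Str.split₀ line).headD "") "Parameter") = true
    · rw [if_pos hh, if_pos hh, pvLoopA_found]
      simp
    · rw [if_neg hh, if_neg (by simp), if_neg (by simp), if_neg hh, ih]
      cases hr : pvHdrIdx rest <;> simp

-- ===== VERDICT (by name: the statement is the Claim_ definition above) =====
theorem get_parameters_doc_spec : Claim_equal_get_parameters_doc := by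
  intro doc _
  unfold Spec_get_parameters_doc
  cases doc with
  | none => rfl
  | some s =>
    by_cases hs : s = ""
    · simp [get_parameters_doc, get_parameters_doc_alt, hs]
    · simp only [get_parameters_doc, get_parameters_doc_alt, if_neg hs]
      generalize ((PySem.Str.split? s "\n").getD []) = lines
      rw [pvLoopA_search]
      cases hi : pvHdrIdx lines with
      | none => simp
      | some i =>
        simp only []
        have htail : PySem.List.slice lines (some ((i : Int) + 1)) none = lines.drop (i + 1) := by
          have h1 : ((i : Int) + 1) = ((i + 1 : Nat) : Int) := by push_cast; ring
          rw [h1, PySem.List.slice_from_natCast]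
        rw [htail]
        generalize lines.drop (i + 1) = tl
        by_cases h0 : pvBlankIdx tl = 0
        · simp [h0]
        · rw [if_neg h0]
          have htlne : tl ≠ [] := by
            intro h; rw [h] at h0; exact h0 rfl
          obtain ⟨line, rest, hcons⟩ := List.exists_cons_of_ne_nil htlne
          have hne : (tl.take (pvBlankIdx tl)).isEmpty = false := by
            subst hcons
            rcases Nat.exists_eq_succ_of_ne_zero h0 with ⟨k, hk⟩
            simp [hk, List.take_succ_cons]
          rw [hne]
          simp only [Bool.not_false, Bool.true_and]
          rw [if_pos trivial]
          congr 1
          rw [PySem.List.slice_from_one,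
            show ((1 : Int) = ((1 : Nat) : Int)) by norm_num,
            PySem.List.slice_natCast]
          rw [← List.drop_one, List.drop_take, List.drop_one]
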